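-- pv_equiv track=rewrite | github.com/dxmension/senior_project | backend/src/nutrack/mock_exams/generation.py | _join_parts
-- ===== SOURCE A (Python) =====
-- def _join_parts(parts: list[str], limit: int) -> str:
--     chunks: list[str] = []
--     size = 0
--     for part in parts:
--         if size + len(part) > limit:
--             break
--         chunks.append(part)
--         size += len(part)
--     return "\n\n".join(chunks)
-- ===== SOURCE B (Python) =====
-- def _join_parts(parts: list[str], limit: int) -> str:
--     # prefix-sum formulation: cumulative lengths, cutoff = how many prefix sums fit
--     total = 0
--     cums = []
--     for p in parts:
--         total += len(p)
--         cums.append(total)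
--     cutoff = sum(1 for c in cums if c <= limit)
--     return "\n\n".join(parts[:cutoff])
-- ===== Notes on version B (the rewrite author's own statement) =====
-- stated objective: alternative
-- what changed: Replaces the stateful accumulate-and-break loop with a prefix-sum table: cumulative lengths are built first, the cutoff index is the count of prefix sums <= limit (valid since lengths are non-negative so the sums are monotone), and the result is the join of that prefix slice.
import Mathlib
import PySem

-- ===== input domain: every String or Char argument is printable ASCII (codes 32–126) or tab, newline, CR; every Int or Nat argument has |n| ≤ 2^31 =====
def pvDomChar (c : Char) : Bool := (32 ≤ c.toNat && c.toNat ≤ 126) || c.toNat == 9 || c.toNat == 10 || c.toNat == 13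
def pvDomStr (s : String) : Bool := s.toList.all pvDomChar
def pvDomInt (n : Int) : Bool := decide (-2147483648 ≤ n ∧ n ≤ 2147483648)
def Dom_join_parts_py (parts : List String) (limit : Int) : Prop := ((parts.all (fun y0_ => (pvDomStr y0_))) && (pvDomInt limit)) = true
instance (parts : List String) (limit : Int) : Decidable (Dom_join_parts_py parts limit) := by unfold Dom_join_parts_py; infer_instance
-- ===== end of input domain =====

-- B replaces A's accumulate-and-break loop by a prefix-sum table: cutoff = count of cumulative lengths ≤ limit, then join the slice (alternative decomposition, same cost).


-- ===== PORT A =====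
-- the for-loop with break, carrying (chunks, size); returns the chunks collected
def joinPartsLoopA (limit : Int) (parts : List String) (size : Int) : List String :=
  match parts with
  | [] => []
  | p :: rest =>
      if size + PySem.Str.len p > limit then []
      else p :: joinPartsLoopA limit rest (size + PySem.Str.len p)

def join_parts_py (parts : List String) (limit : Int) : String :=
  PySem.Str.join "\n\n" (joinPartsLoopA limit parts 0)

-- ===== PORT B =====
-- cumulative lengths built by one fold (B's first loop)
def joinPartsCums (parts : List String) : List Int :=
  (parts.foldl
    (fun (st : Int × List Int) p =>
      (st.1 + PySem.Str.len p, st.2 ++ [st.1 + PySem.Str.len p]))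
    (0, [])).2

def join_parts_py_alt (parts : List String) (limit : Int) : String :=
  let cums := joinPartsCums parts
  let cutoff := cums.countP (fun c => c ≤ limit)
  PySem.Str.join "\n\n" (PySem.List.slice parts none (some (cutoff : Int)))

-- ===== PRECONDITION & SPEC =====
def Spec_join_parts_py (parts : List String) (limit : Int) (out : String) : Prop := out = join_parts_py_alt parts limit
instance (parts : List String) (limit : Int) (out : String) : Decidable (Spec_join_parts_py parts limit out) := by unfold Spec_join_parts_py; infer_instance

-- ===== CLAIM (what is proved, stated in full; the proofs are below) =====
def Claim_equal_join_parts_py : Prop := ∀ (parts : List String) (limit : Int), Dom_join_parts_py parts limit → Spec_join_parts_py parts limit (join_parts_py parts limit)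

-- ===== LEMMAS AND PROOFS =====

-- simple scan of cumulative sums starting from s
def cumFrom (parts : List String) (s : Int) : List Int :=
  match parts with
  | [] => []
  | p :: rest => (s + PySem.Str.len p) :: cumFrom rest (s + PySem.Str.len p)

theorem cums_fold_eq (parts : List String) (s : Int) (acc : List Int) :
    (parts.foldl
      (fun (st : Int × List Int) p =>
        (st.1 + PySem.Str.len p, st.2 ++ [st.1 + PySem.Str.len p]))
      (s, acc)).2 = acc ++ cumFrom parts s := by
  induction parts generalizing s acc with
  | nil => simp [cumFrom]
  | cons p rest ih =>
      simp only [List.foldl]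
      rw [ih]
      simp [cumFrom]

theorem joinPartsCums_eq (parts : List String) :
    joinPartsCums parts = cumFrom parts 0 := by
  simpa using cums_fold_eq parts 0 []

theorem cumFrom_ge (parts : List String) (s : Int) :
    ∀ x ∈ cumFrom parts s, s ≤ x := by
  induction parts generalizing s with
  | nil => simp [cumFrom]
  | cons p rest ih =>
      intro x hx
      have hp : (0 : Int) ≤ PySem.Str.len p := by
        simp [PySem.Str.len_eq]
      simp only [cumFrom, List.mem_cons] at hx
      rcases hx with rfl | hx
      · omega
      · have := ih (s + PySem.Str.len p) x hx
        omega

theorem loopA_eq_take (limit : Int) (parts : List String) (s : Int) :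
    joinPartsLoopA limit parts s =
      parts.take ((cumFrom parts s).countP (fun c => c ≤ limit)) := by
  induction parts generalizing s with
  | nil => simp [joinPartsLoopA, cumFrom]
  | cons p rest ih =>
      by_cases h : s + PySem.Str.len p > limit
      · have hcount : ((cumFrom (p :: rest) s).countP (fun c => c ≤ limit)) = 0 := by
          rw [List.countP_eq_zero]
          intro x hx
          simp only [cumFrom, List.mem_cons] at hx
          rcases hx with rfl | hx
          · simp only [decide_eq_true_eq, not_le, PySem.Str.len_eq] at h ⊢
            omega
          · have hge := cumFrom_ge rest (s + PySem.Str.len p) x hx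
            simp only [decide_eq_true_eq, not_le, PySem.Str.len_eq] at h hge ⊢
            omega
        simp only [joinPartsLoopA, if_pos h, hcount, List.take_zero]
      · have hle : (decide (s + PySem.Str.len p ≤ limit)) = true := by
          simp only [decide_eq_true_eq, PySem.Str.len_eq] at h ⊢
          omega
        simp only [joinPartsLoopA, if_neg h, cumFrom, List.countP_cons, hle,
          if_true, List.take_succ_cons, ih]

theorem join_parts_py_spec : Claim_equal_join_parts_py := by
  intro parts limit _
  unfold Spec_join_parts_py join_parts_py join_parts_py_alt
  simp only [joinPartsCums_eq, PySem.List.slice_to_natCast]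
  rw [loopA_eq_take]
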